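-- pv_equiv track=rewrite | github.com/posl/comment_recommendation | script/split_gen/4_time/zh/178_D/3.py | solve
-- ===== SOURCE A (Python) =====
-- def solve(S):
--     dp = [0]*(S+1)
--     dp[0] = 1
--     for i in range(3,S+1):
--         for j in range(i-2):
--             dp[i] += dp[j]
--             dp[i] %= 1000000007
--     return dp[S]
-- ===== SOURCE B (Python) =====
-- def solve(S):
--     MOD = 1000000007
--     w = [1, 0, 0]          # dp[i-3], dp[i-2], dp[i-1] sliding window
--     if S < 3:
--         return w[S]
--     acc = 0                # running prefix sum of dp[0..i-3] modulo MOD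
--     for _ in range(3, S + 1):
--         acc = (acc + w[0]) % MOD
--         w = [w[1], w[2], acc]
--     return w[2]
-- ===== Notes on version B (the rewrite author's own statement) =====
-- stated objective: faster
-- what changed: B replaces A's O(S^2) DP (inner loop re-summing dp[0..i-3] for every i) by a single pass that maintains a running modular prefix sum and a 3-element sliding window, so the inner loop disappears and only O(1) state is kept.
import Mathlib
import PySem

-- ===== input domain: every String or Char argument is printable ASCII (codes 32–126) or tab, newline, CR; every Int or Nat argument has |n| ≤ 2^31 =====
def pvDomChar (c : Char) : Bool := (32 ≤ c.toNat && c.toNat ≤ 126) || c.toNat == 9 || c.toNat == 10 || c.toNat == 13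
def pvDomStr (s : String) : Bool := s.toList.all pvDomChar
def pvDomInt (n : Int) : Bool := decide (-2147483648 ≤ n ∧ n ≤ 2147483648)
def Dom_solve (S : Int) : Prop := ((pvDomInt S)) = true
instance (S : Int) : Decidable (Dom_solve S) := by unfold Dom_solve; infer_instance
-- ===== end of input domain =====

-- B replaces A's quadratic DP (inner loop re-summing the prefix of dp) by one pass with a
-- running modular prefix sum and a 3-element sliding window (objective: faster, O(S) vs O(S^2)).

-- ===== PORT A =====
-- dp is held as an Array so that each index read/write is O(1) during evaluation; under Pre_
-- every index used is nonnegative and in range, where getD/setIfInBounds/toNat are exactly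
-- Python's list indexing/assignment (Python raises only at dp[0] = 1 when S < 0, outside Pre_).
def solve (S : Int) : Int :=
  let dp := Array.replicate (S + 1).toNat (0 : Int)       -- dp = [0]*(S+1)
  let dp := dp.setIfInBounds 0 1                          -- dp[0] = 1
  let dp := (PySem.List.pyRange 3 (S + 1) 1).foldl (fun dp i =>
      (PySem.List.pyRange 0 (i - 2) 1).foldl (fun dp j =>
        let dp := dp.setIfInBounds i.toNat (dp.getD i.toNat 0 + dp.getD j.toNat 0)  -- dp[i] += dp[j]
        dp.setIfInBounds i.toNat (PySem.Int.mod (dp.getD i.toNat 0) 1000000007)) dp) dp  -- dp[i] %= MOD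
  dp.getD S.toNat 0                                       -- return dp[S]

-- ===== PORT B =====
def solve_alt (S : Int) : Int :=
  let w : List Int := [1, 0, 0]
  if S < 3 then PySem.List.pyGetD w S 0                   -- return w[S]
  else
    let st := (PySem.List.pyRange 3 (S + 1) 1).foldl (fun (st : Int × List Int) _ =>
        let acc := PySem.Int.mod (st.1 + PySem.List.pyGetD st.2 0 0) 1000000007
        (acc, [PySem.List.pyGetD st.2 1 0, PySem.List.pyGetD st.2 2 0, acc])) ((0 : Int), w)
    PySem.List.pyGetD st.2 2 0                            -- return w[2]

-- ===== PRECONDITION & SPEC =====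
-- Pre_: for S < 0 the Python A raises IndexError at dp[0] = 1 (dp is empty there).
def Pre_solve (S : Int) : Prop := 0 ≤ S
instance (S : Int) : Decidable (Pre_solve S) := by unfold Pre_solve; infer_instance
def pvWitness_solve : Int := 5

def Spec_solve (S : Int) (out : Int) : Prop := out = solve_alt S
instance (S : Int) (out : Int) : Decidable (Spec_solve S out) := by unfold Spec_solve; infer_instance

-- ===== CLAIM (what is proved, stated in full; the proofs are below) =====
def Claim_equal_solve : Prop := ∀ (S : Int), Dom_solve S → Pre_solve S → Spec_solve S (solve S)

-- ===== LEMMAS AND PROOFS =====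

-- One step of B's loop, and its k-fold iteration (the state after k iterations).
def pvStep (st : Int × List Int) : Int × List Int :=
  let acc := PySem.Int.mod (st.1 + PySem.List.pyGetD st.2 0 0) 1000000007
  (acc, [PySem.List.pyGetD st.2 1 0, PySem.List.pyGetD st.2 2 0, acc])

def pvG : Nat → Int × List Int
  | 0 => (0, [1, 0, 0])
  | k + 1 => pvStep (pvG k)

-- The DP value at index p (dp[p] in A, window entries in B).
def pvF (p : Nat) : Int :=
  if p = 0 then 1 else if p ≤ 2 then 0 else (pvG (p - 2)).1

lemma pvG_snd (k : Nat) : (pvG k).2 = [pvF k, pvF (k + 1), pvF (k + 2)] := by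
  induction k with
  | zero => simp [pvG, pvF]
  | succ k ih =>
    have h3 : pvF (k + 3) = (pvG (k + 1)).1 := by simp [pvF]
    rw [show k + 1 + 1 = k + 2 from rfl, show k + 1 + 2 = k + 3 from rfl, h3]
    simp [pvG, pvStep, ih, PySem.List.pyGetD]

lemma pvG_fst_succ (k : Nat) :
    (pvG (k + 1)).1 = PySem.Int.mod ((pvG k).1 + pvF k) 1000000007 := by
  rw [show pvG (k + 1) = pvStep (pvG k) from rfl]
  simp [pvStep, pvG_snd k, PySem.List.pyGetD]

-- B's fold ignores the loop variable: it iterates pvStep (range length) times.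
lemma foldl_const_iterate {α β : Type} (g : α → α) (l : List β) (a : α) :
    l.foldl (fun s _ => g s) a = g^[l.length] a := by
  induction l generalizing a with
  | nil => rfl
  | cons x xs ih => simp [List.foldl_cons, ih, Function.iterate_succ_apply]

lemma iterate_pvStep (k : Nat) : pvStep^[k] (0, [1, 0, 0]) = pvG k := by
  induction k with
  | zero => rfl
  | succ k ih => rw [Function.iterate_succ_apply', ih]; rfl

-- A's dp list after m outer iterations (indices 3 .. 2+m filled).
def pvDp (n m : Nat) : List Int :=
  (List.range (n + 1)).map (fun p => if p < m + 3 then pvF p else 0)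

lemma length_pvDp (n m : Nat) : (pvDp n m).length = n + 1 := by
  simp [pvDp]

lemma getD_pvDp (n m p : Nat) (hp : p ≤ n) :
    (pvDp n m).getD p 0 = if p < m + 3 then pvF p else 0 := by
  rw [List.getD_eq_getElem _ _ (by simp [length_pvDp]; omega)]
  simp [pvDp]

-- Running value of A's inner loop after t iterations.
def pvInner (dp : List Int) (i t : Nat) : Int :=
  (List.range t).foldl (fun c j => PySem.Int.mod (c + dp.getD j 0) 1000000007) (dp.getD i 0)

-- One pass of A's inner loop body (dp[i] += dp[j]; dp[i] %= MOD), on the list model.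
def pvInnerStepL (i : Nat) (xs : List Int) (j : Int) : List Int :=
  let xs' := xs.set i (xs.getD i 0 + xs.getD j.toNat 0)
  xs'.set i (PySem.Int.mod (xs'.getD i 0) 1000000007)

-- A's outer loop body on the list model, and exactly as in the port (on arrays).
def pvOuterL (xs : List Int) (i : Int) : List Int :=
  (PySem.List.pyRange 0 (i - 2) 1).foldl (pvInnerStepL i.toNat) xs

def pvOuterA (dp : Array Int) (i : Int) : Array Int :=
  (PySem.List.pyRange 0 (i - 2) 1).foldl (fun dp j =>
    let dp := dp.setIfInBounds i.toNat (dp.getD i.toNat 0 + dp.getD j.toNat 0)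
    dp.setIfInBounds i.toNat (PySem.Int.mod (dp.getD i.toNat 0) 1000000007)) dp

-- Array/List representation bridges.
lemma pvArr_getD (xs : List Int) (i : Nat) (d : Int) : xs.toArray.getD i d = xs.getD i d := by
  unfold Array.getD
  rcases Nat.lt_or_ge i xs.length with h | h
  · rw [dif_pos (by simpa using h), List.getD_eq_getElem _ _ h]
    simp
  · rw [dif_neg (by simpa using h), List.getD_eq_default _ _ h]

lemma foldl_toArray {β : Type} (l : List β) (f : List Int → β → List Int)
    (g : Array Int → β → Array Int)
    (hfg : ∀ xs b, g xs.toArray b = (f xs b).toArray) :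
    ∀ xs : List Int, l.foldl g xs.toArray = (l.foldl f xs).toArray := by
  induction l with
  | nil => intro xs; rfl
  | cons b l ih => intro xs; rw [List.foldl_cons, List.foldl_cons, hfg, ih]

lemma outerA_eq (xs : List Int) (i : Int) : pvOuterA xs.toArray i = (pvOuterL xs i).toArray := by
  unfold pvOuterA pvOuterL
  apply foldl_toArray
  intro ys j
  simp only [pvInnerStepL, pvArr_getD, List.setIfInBounds_toArray]

-- A's inner loop: after the whole inner fold, only index i changed, to pvInner dp i t.
lemma inner_fold (dp : List Int) (i : Nat) (hi : i < dp.length) :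
    ∀ t : Nat, t ≤ i →
    (PySem.List.pyRange 0 (t : Int) 1).foldl (pvInnerStepL i) dp = dp.set i (pvInner dp i t) := by
  intro t
  induction t with
  | zero =>
    intro _
    rw [PySem.List.pyRange_one_eq_nil (by norm_num)]
    simp only [List.foldl_nil, pvInner, List.range_zero]
    rw [List.getD_eq_getElem _ _ hi]
    exact (List.set_getElem_self hi).symm
  | succ t ih =>
    intro hti
    have h1 : ((t + 1 : Nat) : Int) = (t : Int) + 1 := by push_cast; ring
    rw [h1, PySem.List.pyRange_one_succ_right (by positivity), List.foldl_append,
        ih (by omega)]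
    simp only [List.foldl_cons, List.foldl_nil, pvInnerStepL, Int.toNat_natCast]
    have hset' : ∀ (v w : Int), (dp.set i v).set i w = dp.set i w := fun v w => List.set_set ..
    have hgi' : ∀ v : Int, (dp.set i v).getD i 0 = v := by
      intro v
      rw [List.getD_eq_getElem _ _ (by simpa using hi)]
      simp
    have hgt : (dp.set i (pvInner dp i t)).getD t 0 = dp.getD t 0 := by
      rcases Nat.lt_or_ge t dp.length with h | h
      · rw [List.getD_eq_getElem _ _ (by simpa using h), List.getD_eq_getElem _ _ h]
        rw [List.getElem_set_ne (by omega)]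
      · rw [List.getD_eq_default _ _ (by simpa using h), List.getD_eq_default _ _ h]
    have hstep : pvInner dp i (t + 1) = PySem.Int.mod (pvInner dp i t + dp.getD t 0) 1000000007 := by
      simp [pvInner, List.range_succ]
    rw [hgi', hgt, hset', hgi', hset', hstep]

lemma smod_fold (k : Nat) :
    (List.range k).foldl (fun c j => PySem.Int.mod (c + pvF j) 1000000007) 0 = (pvG k).1 := by
  induction k with
  | zero => rfl
  | succ k ih =>
    rw [List.range_succ, List.foldl_append]
    simp only [List.foldl_cons, List.foldl_nil]
    rw [ih, pvG_fst_succ]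

lemma pvF_high (m : Nat) : pvF (3 + m) = (pvG (m + 1)).1 := by
  unfold pvF
  rw [if_neg (by omega), if_neg (by omega), show 3 + m - 2 = m + 1 from by omega]

lemma pvInner_pvDp (n m : Nat) (_h : 3 + m ≤ n) :
    pvInner (pvDp n m) (3 + m) (m + 1) = pvF (3 + m) := by
  unfold pvInner
  rw [getD_pvDp n m (3 + m) (by omega), if_neg (by omega)]
  have hcong : (List.range (m + 1)).foldl
        (fun c j => PySem.Int.mod (c + (pvDp n m).getD j 0) 1000000007) 0
      = (List.range (m + 1)).foldl (fun c j => PySem.Int.mod (c + pvF j) 1000000007) 0 := by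
    apply PySem.List.foldl_congr_mem
    intro c j hj
    rw [getD_pvDp n m j (by simp at hj; omega), if_pos (by simp at hj; omega)]
  rw [hcong, smod_fold, pvF_high]

lemma set_pvDp (n m : Nat) (_h : 3 + m ≤ n) :
    (pvDp n m).set (3 + m) (pvF (3 + m)) = pvDp n (m + 1) := by
  apply List.ext_getElem
  · simp [pvDp]
  · intro p h1 h2
    simp only [List.getElem_set, pvDp, List.getElem_map, List.getElem_range]
    by_cases hp : 3 + m = p
    · subst hp
      rw [if_pos rfl, if_pos (by omega)]
    · rw [if_neg hp]
      by_cases h3 : p < m + 3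
      · rw [if_pos h3, if_pos (by omega)]
      · rw [if_neg h3, if_neg (by omega)]

lemma init_dp (n : Nat) :
    (List.replicate (n + 1) (0 : Int)).set 0 1 = pvDp n 0 := by
  apply List.ext_getElem
  · simp [pvDp]
  · intro p h1 h2
    simp only [List.getElem_set, List.getElem_replicate, pvDp, List.getElem_map,
      List.getElem_range]
    by_cases hp : 0 = p
    · rw [if_pos hp]
      cases hp
      simp [pvF]
    · rw [if_neg hp]
      by_cases h3 : p < 3
      · rw [if_pos h3]
        interval_cases p
        · exact absurd rfl hp
        · simp [pvF]
        · simp [pvF]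
      · rw [if_neg h3]

lemma outer_fold (n : Nat) : ∀ m, 3 + m ≤ n + 1 →
    (PySem.List.pyRange 3 ((3 + m : Nat) : Int) 1).foldl pvOuterL (pvDp n 0) = pvDp n m := by
  intro m
  induction m with
  | zero =>
    intro _
    rw [show ((3 + 0 : Nat) : Int) = 3 from by norm_num,
      PySem.List.pyRange_one_eq_nil (by norm_num), List.foldl_nil]
  | succ m ih =>
    intro hm
    have h1 : ((3 + (m + 1) : Nat) : Int) = ((3 + m : Nat) : Int) + 1 := by push_cast; ring
    rw [h1, PySem.List.pyRange_one_succ_right (by push_cast; omega), List.foldl_append,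
      ih (by omega)]
    simp only [List.foldl_cons, List.foldl_nil, pvOuterL, Int.toNat_natCast]
    have h2 : ((3 + m : Nat) : Int) - 2 = ((m + 1 : Nat) : Int) := by push_cast; ring
    rw [h2, inner_fold (pvDp n m) (3 + m) (by rw [length_pvDp]; omega) (m + 1) (by omega),
      pvInner_pvDp n m (by omega), set_pvDp n m (by omega)]

-- ===== VERDICT (by name: the statement is the Claim_ definition above) =====
theorem solve_spec : Claim_equal_solve := by
  intro S _ hpre
  unfold Spec_solve
  unfold Pre_solve at hpre
  by_cases hlt : S < 3
  · interval_cases S <;> decide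
  · rw [not_lt] at hlt
    obtain ⟨n, rfl⟩ : ∃ n : Nat, S = (n : Int) := ⟨S.toNat, (Int.toNat_of_nonneg hpre).symm⟩
    have hn : 3 ≤ n := by exact_mod_cast hlt
    have hA : solve (n : Int) = pvF n := by
      unfold solve
      change ((PySem.List.pyRange 3 ((n : Int) + 1) 1).foldl pvOuterA
          ((Array.replicate ((n : Int) + 1).toNat 0).setIfInBounds 0 1)).getD (n : Int).toNat 0
        = pvF n
      have e1 : ((n : Int) + 1).toNat = n + 1 := by omega
      have e2 : ((n : Int) + 1) = ((3 + (n - 3 + 1) : Nat) : Int) := by push_cast; omega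
      rw [e1, ← List.toArray_replicate, List.setIfInBounds_toArray, init_dp n,
        foldl_toArray _ pvOuterL pvOuterA outerA_eq (pvDp n 0),
        e2, outer_fold n (n - 3 + 1) (by omega), pvArr_getD, Int.toNat_natCast,
        getD_pvDp n _ n (le_refl n), if_pos (by omega)]
    have hB : solve_alt (n : Int) = pvF n := by
      unfold solve_alt
      rw [if_neg (by exact_mod_cast not_lt.mpr hlt)]
      change PySem.List.pyGetD ((PySem.List.pyRange 3 ((n : Int) + 1) 1).foldl
        (fun st _ => pvStep st) ((0 : Int), [1, 0, 0])).2 2 0 = pvF n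
      rw [foldl_const_iterate pvStep, PySem.List.length_pyRange_one,
        show ((n : Int) + 1 - 3).toNat = n - 2 from by omega,
        iterate_pvStep (n - 2), pvG_snd]
      rw [show PySem.List.pyGetD [pvF (n - 2), pvF (n - 2 + 1), pvF (n - 2 + 2)] 2 0
          = pvF (n - 2 + 2) from by simp [PySem.List.pyGetD]]
      congr 1
      omega
    rw [hA, hB]
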